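-- pv_equiv track=rewrite | github.com/Fruitful-Network-Development/webDZ | srv/compose/platform/flask-bff/scripts/demo_data_common.py | _coerce_missing_colons
-- ===== SOURCE A (Python) =====
-- def _coerce_missing_colons(fragment: str) -> str:
--     """Attempt to replace pseudo key/value pairs that omit colons."""
--     chars = list(fragment)
--     container_stack: list[str] = []
--     in_string = False
--     escape = False
--     string_prev_non_space: str | None = None
--     index = 0
--
--     while index < len(chars):
--         char = chars[index]
--
--         if in_string:
--             if escape:
--                 escape = False
--             elif char == "\\":
--                 escape = True
--             elif char == '"':
--                 in_string = False
--                 if container_stack and container_stack[-1] == "object" and string_prev_non_space in ("{", ","):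
--                     look = index + 1
--                     while look < len(chars) and chars[look].isspace():
--                         look += 1
--                     if look < len(chars) and chars[look] == ",":
--                         look_ahead = look + 1
--                         while look_ahead < len(chars) and chars[look_ahead].isspace():
--                             look_ahead += 1
--                         if look_ahead < len(chars) and chars[look_ahead] == '"':
--                             chars[look] = ":"
--             index += 1
--             continue
--
--         if char == '"':
--             in_string = True
--             prev = index - 1
--             while prev >= 0 and chars[prev].isspace():
--                 prev -= 1
--             string_prev_non_space = chars[prev] if prev >= 0 else None
--         elif char == "{":
--             container_stack.append("object")
--         elif char == "[":
--             container_stack.append("array")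
--         elif char in ("]", "}"):
--             if container_stack:
--                 container_stack.pop()
--
--         index += 1
--
--     return "".join(chars)
-- ===== SOURCE B (Python) =====
-- import re
--
-- # All quoted-string spans, the way the scanner sees them (escapes honoured).
-- _STRING = re.compile(r'"(?:\\.|[^"\\])*"', re.DOTALL)
--
--
-- def _coerce_missing_colons(fragment: str) -> str:
--     """Attempt to replace pseudo key/value pairs that omit colons."""
--     chars = list(fragment)
--     spans = [(m.start(), m.end() - 1) for m in _STRING.finditer(fragment)]
--     stack: list[str] = []
--     prev_end = 0  # index just past the previously handled string (start of the gap)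
--     for open_q, close_q in spans:
--         for k in range(prev_end, open_q):
--             ch = chars[k]
--             if ch == "{":
--                 stack.append("object")
--             elif ch == "[":
--                 stack.append("array")
--             elif ch in ("]", "}"):
--                 if stack:
--                     stack.pop()
--         p = open_q - 1
--         while p >= 0 and chars[p].isspace():
--             p -= 1
--         prev = chars[p] if p >= 0 else None
--         if stack and stack[-1] == "object" and prev in ("{", ","):
--             look = close_q + 1
--             while look < len(chars) and chars[look].isspace():
--                 look += 1
--             if look < len(chars) and chars[look] == ",":
--                 look_ahead = look + 1
--                 while look_ahead < len(chars) and chars[look_ahead].isspace():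
--                     look_ahead += 1
--                 if look_ahead < len(chars) and chars[look_ahead] == '"':
--                     chars[look] = ":"
--         prev_end = close_q + 1
--     return "".join(chars)
-- ===== Notes on version B (the rewrite author's own statement) =====
-- stated objective: faster
-- what changed: Replaces the single char-by-char state machine (in_string/escape flags threaded through one while loop) by a two-phase design: a regex finds all quoted-string spans up front, then one fold over those spans updates the bracket stack from the inter-string gaps and patches the comma after each qualifying string.
import Mathlib
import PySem

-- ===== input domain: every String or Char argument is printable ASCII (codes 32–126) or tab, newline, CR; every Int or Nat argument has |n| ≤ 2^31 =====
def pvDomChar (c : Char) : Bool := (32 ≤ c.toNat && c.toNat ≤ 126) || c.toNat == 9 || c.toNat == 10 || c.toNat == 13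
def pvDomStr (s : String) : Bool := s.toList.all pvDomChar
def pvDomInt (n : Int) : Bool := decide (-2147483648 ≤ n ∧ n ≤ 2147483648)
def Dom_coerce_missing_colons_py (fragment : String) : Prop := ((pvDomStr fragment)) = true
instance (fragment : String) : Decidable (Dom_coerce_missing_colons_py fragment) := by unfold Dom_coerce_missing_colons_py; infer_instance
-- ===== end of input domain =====

-- B re-implements A's one-pass state machine as 'find all string spans first, then fold over them'
-- (regex up front); same return value (proved equal below); measured faster by a constant factor
-- (the string scanning runs in the regex engine instead of the per-character Python loop).

-- Helpers shared by both ports (the identical small while-loops both Python versions contain):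
-- 'while look < len(chars) and chars[look].isspace(): look += 1'
def skipWs (chars : List Char) (i : Nat) : Nat :=
  if h : i < chars.length then
    if PySem.Chars.isspace chars[i] then skipWs chars (i + 1) else i
  else i
termination_by chars.length - i

-- 'p = k-1; while p >= 0 and chars[p].isspace(): p -= 1; chars[p] if p >= 0 else None'
-- (argument k is the index just AFTER the last candidate position, so Nat suffices)
def prevNonWs (chars : List Char) : Nat → Option Char
  | 0 => none
  | k + 1 => if PySem.Chars.isspace (chars.getD k ' ') then prevNonWs chars k else some (chars.getD k ' ')

-- the comma-fixing block both Pythons run when a string closes at index `close`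
-- (guard + forward whitespace scans + the single in-place write)
def applyFix (chars : List Char) (stack : List String) (prev : Option Char) (close : Nat) : List Char :=
  if stack.head? = some "object" ∧ (prev = some '{' ∨ prev = some ',') then
    if chars[skipWs chars (close + 1)]? = some ',' then
      if chars[skipWs chars (skipWs chars (close + 1) + 1)]? = some '"' then
        chars.set (skipWs chars (close + 1)) ':'
      else chars
    else chars
  else chars

theorem applyFix_length (chars : List Char) (stack : List String) (prev : Option Char) (close : Nat) :
    (applyFix chars stack prev close).length = chars.length := by
  unfold applyFix; split <;> (try split_ifs) <;> simp

-- ===== PORT A =====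
-- literal transliteration of the while loop; the stack grows at the head (top = container_stack[-1])
def loopA (chars : List Char) (stack : List String) (inStr esc : Bool)
    (spns : Option Char) (index : Nat) : List Char :=
  if h : index < chars.length then
    let char := chars[index]
    if inStr then
      if esc then loopA chars stack true false spns (index + 1)
      else if char = '\\' then loopA chars stack true true spns (index + 1)
      else if char = '"' then
        loopA (applyFix chars stack spns index) stack false esc spns (index + 1)
      else loopA chars stack true esc spns (index + 1)
    else
      if char = '"' then loopA chars stack true esc (prevNonWs chars index) (index + 1)
      else if char = '{' then loopA chars ("object" :: stack) inStr esc spns (index + 1)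
      else if char = '[' then loopA chars ("array" :: stack) inStr esc spns (index + 1)
      else if char = ']' ∨ char = '}' then
        loopA chars (if stack ≠ [] then stack.tail else stack) inStr esc spns (index + 1)
      else loopA chars stack inStr esc spns (index + 1)
  else chars
termination_by chars.length - index
decreasing_by all_goals first
  | exact Nat.sub_succ_lt_self _ _ h
  | (rw [applyFix_length]; exact Nat.sub_succ_lt_self _ _ h)

def coerce_missing_colons_py (fragment : String) : String :=
  String.ofList (loopA fragment.toList [] false false none 0)

-- ===== PORT B =====
-- hand port of the regex r'"(?:\\.|[^"\\])*"' (exact for this pattern): from the char after an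
-- opening quote, return the number of chars up to and including the closing quote, none if unterminated
def scanStr : List Char → Option Nat
  | [] => none
  | c :: rest =>
    if c = '"' then some 1
    else if c = '\\' then
      match rest with
      | [] => none
      | _ :: rest' => (scanStr rest').map (· + 2)
    else (scanStr rest).map (· + 1)

-- hand port of re.finditer for that pattern: spans (open-quote index, close-quote index),
-- ofs = absolute offset of l's head; a position that cannot start a match is skipped
def findStrs (l : List Char) (ofs : Nat) : List (Nat × Nat) :=
  match l with
  | [] => []
  | c :: rest =>
    if c = '"' then
      match scanStr rest with
      | some m => (ofs, ofs + m) :: findStrs (rest.drop m) (ofs + m + 1)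
      | none => findStrs rest (ofs + 1)
    else findStrs rest (ofs + 1)
termination_by l.length
decreasing_by all_goals simp [List.length_drop]; try omega

-- the bracket-stack update for one gap character
def stepStack (stack : List String) (ch : Char) : List String :=
  if ch = '{' then "object" :: stack
  else if ch = '[' then "array" :: stack
  else if ch = ']' ∨ ch = '}' then (if stack ≠ [] then stack.tail else stack)
  else stack

-- the fold over the spans: stack from the gap, prev-non-space, comma fix, continue after the string
def goB (spans : List (Nat × Nat)) (chars : List Char) (pe : Nat) (stack : List String) : List Char :=
  match spans with
  | [] => chars
  | (o, c) :: rest =>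
    let stack' := ((chars.drop pe).take (o - pe)).foldl stepStack stack
    let chars' := applyFix chars stack' (prevNonWs chars o) c
    goB rest chars' (c + 1) stack'

def coerce_missing_colons_py_alt (fragment : String) : String :=
  let chars := fragment.toList
  String.ofList (goB (findStrs chars 0) chars 0 [])

-- ===== PRECONDITION & SPEC =====
def Spec_coerce_missing_colons_py (fragment : String) (out : String) : Prop := out = coerce_missing_colons_py_alt fragment
instance (fragment : String) (out : String) : Decidable (Spec_coerce_missing_colons_py fragment out) := by unfold Spec_coerce_missing_colons_py; infer_instance

-- ===== CLAIM (what is proved, stated in full; the proofs are below) =====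
def Claim_equal_coerce_missing_colons_py : Prop := ∀ (fragment : String), Dom_coerce_missing_colons_py fragment → Spec_coerce_missing_colons_py fragment (coerce_missing_colons_py fragment)

-- ===== LEMMAS AND PROOFS =====

-- unfold lemmas for loopA (one step of A's while loop, per branch)
theorem loopA_end (chars : List Char) (stack : List String) (inStr esc : Bool) (sp : Option Char)
    (i : Nat) (h : ¬ i < chars.length) : loopA chars stack inStr esc sp i = chars := by
  rw [loopA]; simp [h]

theorem loopA_open (chars : List Char) (stack : List String) (esc : Bool) (sp : Option Char)
    (i : Nat) (h : i < chars.length) (hq : chars[i] = '"') :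
    loopA chars stack false esc sp i = loopA chars stack true esc (prevNonWs chars i) (i + 1) := by
  rw [loopA]; simp [h, hq]

theorem loopA_out_step (chars : List Char) (stack : List String) (esc : Bool) (sp : Option Char)
    (i : Nat) (h : i < chars.length) (hq : chars[i] ≠ '"') :
    loopA chars stack false esc sp i = loopA chars (stepStack stack chars[i]) false esc sp (i + 1) := by
  rw [loopA]
  by_cases h1 : chars[i] = '{' <;> by_cases h2 : chars[i] = '[' <;>
    by_cases h3 : chars[i] = ']' ∨ chars[i] = '}' <;>
      simp_all [stepStack]

theorem loopA_in_esc (chars : List Char) (stack : List String) (sp : Option Char)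
    (i : Nat) (h : i < chars.length) :
    loopA chars stack true true sp i = loopA chars stack true false sp (i + 1) := by
  rw [loopA]; simp [h]

theorem loopA_in_bs (chars : List Char) (stack : List String) (sp : Option Char)
    (i : Nat) (h : i < chars.length) (hc : chars[i] = '\\') :
    loopA chars stack true false sp i = loopA chars stack true true sp (i + 1) := by
  rw [loopA]; simp [h, hc]

theorem loopA_in_close (chars : List Char) (stack : List String) (sp : Option Char)
    (i : Nat) (h : i < chars.length) (hc : chars[i] = '"') :
    loopA chars stack true false sp i =
      loopA (applyFix chars stack sp i) stack false false sp (i + 1) := by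
  rw [loopA]; simp [h, hc]

theorem loopA_in_other (chars : List Char) (stack : List String) (sp : Option Char)
    (i : Nat) (h : i < chars.length) (hb : chars[i] ≠ '\\') (hq : chars[i] ≠ '"') :
    loopA chars stack true false sp i = loopA chars stack true false sp (i + 1) := by
  rw [loopA]; simp [h, hb, hq]

-- unfold lemmas for scanStr
theorem scanStr_nil : scanStr [] = none := rfl

theorem scanStr_quote (rest : List Char) : scanStr ('"' :: rest) = some 1 := by
  rw [scanStr.eq_def]; simp

theorem scanStr_bs_nil : scanStr ['\\'] = none := by
  rw [scanStr.eq_def]; simp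

theorem scanStr_bs_cons (d : Char) (r : List Char) :
    scanStr ('\\' :: d :: r) = (scanStr r).map (· + 2) := by
  rw [scanStr.eq_def]; simp

theorem scanStr_other (c : Char) (rest : List Char) (hc : c ≠ '"') (hb : c ≠ '\\') :
    scanStr (c :: rest) = (scanStr rest).map (· + 1) := by
  rw [scanStr.eq_def]; simp [hc, hb]

-- unfold lemmas for findStrs
theorem findStrs_nil (ofs : Nat) : findStrs [] ofs = [] := by rw [findStrs.eq_def]

theorem findStrs_cons_other (c : Char) (rest : List Char) (ofs : Nat) (hc : c ≠ '"') :
    findStrs (c :: rest) ofs = findStrs rest (ofs + 1) := by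
  rw [findStrs.eq_def]; simp [hc]

theorem findStrs_cons_quote_some (rest : List Char) (ofs m : Nat) (h : scanStr rest = some m) :
    findStrs ('"' :: rest) ofs = (ofs, ofs + m) :: findStrs (rest.drop m) (ofs + m + 1) := by
  rw [findStrs.eq_def]; simp [h]

theorem findStrs_cons_quote_none (rest : List Char) (ofs : Nat) (h : scanStr rest = none) :
    findStrs ('"' :: rest) ofs = findStrs rest (ofs + 1) := by
  rw [findStrs.eq_def]; simp [h]

-- scanStr returns at least 1 (the closing quote is counted)
theorem scanStr_pos : ∀ (l : List Char) (m : Nat), scanStr l = some m → 1 ≤ m := by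
  intro l
  induction l with
  | nil => intro m hm; simp [scanStr_nil] at hm
  | cons c rest ih =>
    intro m hm
    by_cases hc : c = '"'
    · subst hc; rw [scanStr_quote] at hm; injection hm with hh; omega
    · by_cases hb : c = '\\'
      · subst hb
        cases rest with
        | nil => rw [scanStr_bs_nil] at hm; cases hm
        | cons d r =>
          rw [scanStr_bs_cons] at hm
          rw [Option.map_eq_some_iff] at hm
          obtain ⟨m', _, rfl⟩ := hm; omega
      · rw [scanStr_other c rest hc hb, Option.map_eq_some_iff] at hm
        obtain ⟨m', _, rfl⟩ := hm; omega

-- character class: scanStr and findStrs only look at quote / backslash / other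
def cls (c : Char) : Nat := if c = '"' then 0 else if c = '\\' then 1 else 2

theorem cls_quote {c : Char} (h : cls c = 0) : c = '"' := by
  by_cases h1 : c = '"' <;> by_cases h2 : c = '\\' <;> simp_all [cls]

theorem cls_bs {c : Char} (h : cls c = 1) : c = '\\' := by
  by_cases h1 : c = '"' <;> by_cases h2 : c = '\\' <;> simp_all [cls]

theorem scanStr_congr_aux : ∀ (n : Nat) (l₁ l₂ : List Char), l₁.length ≤ n →
    l₁.map cls = l₂.map cls → scanStr l₁ = scanStr l₂ := by
  intro n
  induction n with
  | zero =>
    intro l₁ l₂ hn h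
    have h1 : l₁ = [] := List.eq_nil_of_length_eq_zero (Nat.le_zero.mp hn)
    subst h1
    cases l₂ with
    | nil => rfl
    | cons d r => simp at h
  | succ n ih =>
    intro l₁ l₂ hn h
    cases l₁ with
    | nil =>
      cases l₂ with
      | nil => rfl
      | cons d r => simp at h
    | cons c rest =>
      cases l₂ with
      | nil => simp at h
      | cons d r =>
        simp only [List.map_cons, List.cons.injEq] at h
        obtain ⟨hcd, hr⟩ := h
        simp only [List.length_cons, Nat.add_le_add_iff_right] at hn
        by_cases hc : c = '"'
        · have hd : d = '"' := cls_quote (by rw [← hcd, hc]; rfl)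
          subst hc; subst hd; rw [scanStr_quote, scanStr_quote]
        · by_cases hb : c = '\\'
          · have hd : d = '\\' := cls_bs (by rw [← hcd, hb]; rfl)
            subst hb; subst hd
            cases rest with
            | nil =>
              cases r with
              | nil => rfl
              | cons f r2 => simp at hr
            | cons e r1 =>
              cases r with
              | nil => simp at hr
              | cons f r2 =>
                simp only [List.map_cons, List.cons.injEq] at hr
                simp only [List.length_cons] at hn
                rw [scanStr_bs_cons, scanStr_bs_cons,
                    ih r1 r2 (by omega) hr.2]
          · have hdq : d ≠ '"' := fun hh => hc (cls_quote (by rw [hcd, hh]; rfl))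
            have hdb : d ≠ '\\' := fun hh => hb (cls_bs (by rw [hcd, hh]; rfl))
            rw [scanStr_other c rest hc hb, scanStr_other d r hdq hdb,
                ih rest r hn hr]

theorem scanStr_congr (l₁ l₂ : List Char) (h : l₁.map cls = l₂.map cls) :
    scanStr l₁ = scanStr l₂ :=
  scanStr_congr_aux l₁.length l₁ l₂ (le_refl _) h

theorem findStrs_congr : ∀ (n : Nat) (l₁ l₂ : List Char) (ofs : Nat), l₁.length ≤ n →
    l₁.map cls = l₂.map cls → findStrs l₁ ofs = findStrs l₂ ofs := by
  intro n
  induction n with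
  | zero =>
    intro l₁ l₂ ofs hn h
    have h1 : l₁ = [] := List.eq_nil_of_length_eq_zero (Nat.le_zero.mp hn)
    subst h1
    cases l₂ with
    | nil => rfl
    | cons d r => simp at h
  | succ n ih =>
    intro l₁ l₂ ofs hn h
    cases l₁ with
    | nil =>
      cases l₂ with
      | nil => rfl
      | cons d r => simp at h
    | cons c rest =>
      cases l₂ with
      | nil => simp at h
      | cons d r =>
        simp only [List.map_cons, List.cons.injEq] at h
        obtain ⟨hcd, hr⟩ := h
        simp only [List.length_cons, Nat.add_le_add_iff_right] at hn
        by_cases hc : c = '"'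
        · have hd : d = '"' := cls_quote (by rw [← hcd, hc]; rfl)
          have hscan : scanStr rest = scanStr r := scanStr_congr rest r hr
          subst hc; subst hd
          cases hm : scanStr r with
          | none =>
            rw [findStrs_cons_quote_none rest ofs (hscan.trans hm),
                findStrs_cons_quote_none r ofs hm]
            exact ih rest r (ofs + 1) hn hr
          | some m =>
            rw [findStrs_cons_quote_some rest ofs m (hscan.trans hm),
                findStrs_cons_quote_some r ofs m hm]
            congr 1
            exact ih (rest.drop m) (r.drop m) (ofs + m + 1)
              (by rw [List.length_drop]; omega)
              (by rw [List.map_drop, List.map_drop, hr])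
        · have hd : d ≠ '"' := fun hh => hc (cls_quote (by rw [hcd, hh]; rfl))
          rw [findStrs_cons_other c rest ofs hc, findStrs_cons_other d r ofs hd]
          exact ih rest r (ofs + 1) hn hr

-- overwriting a comma with a colon changes no character class, hence no string spans
theorem map_cls_set (chars : List Char) (lk : Nat) (h : chars[lk]? = some ',') :
    ((chars.set lk ':').map cls) = chars.map cls := by
  obtain ⟨hlt, hval⟩ := List.getElem?_eq_some_iff.mp h
  rw [List.map_set]
  have hv : cls ':' = (chars.map cls)[lk]'(by simpa using hlt) := by
    simp [hval]; rfl
  rw [hv]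
  exact List.set_getElem_self ..

theorem applyFix_findStrs (chars : List Char) (stack : List String) (sp : Option Char)
    (c n ofs : Nat) :
    findStrs ((applyFix chars stack sp c).drop n) ofs = findStrs (chars.drop n) ofs := by
  unfold applyFix
  split
  · split
    · split
      · rename_i hcomma _
        apply findStrs_congr (chars.length) _ _ ofs
        · simp
        · rw [List.map_drop, List.map_drop, map_cls_set chars _ hcomma]
      · rfl
    · rfl
  · rfl

-- if the tail after an opening quote has no closing quote, no later match exists either
theorem fail_prop : ∀ (n : Nat) (l : List Char) (ofs : Nat), l.length ≤ n →
    scanStr l = none → findStrs l ofs = [] := by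
  intro n
  induction n with
  | zero =>
    intro l ofs hn _
    have h1 : l = [] := List.eq_nil_of_length_eq_zero (Nat.le_zero.mp hn)
    subst h1; exact findStrs_nil ofs
  | succ n ih =>
    intro l ofs hn hs
    cases l with
    | nil => exact findStrs_nil ofs
    | cons c rest =>
      simp only [List.length_cons, Nat.add_le_add_iff_right] at hn
      by_cases hc : c = '"'
      · subst hc; rw [scanStr_quote] at hs; cases hs
      · by_cases hb : c = '\\'
        · subst hb
          cases rest with
          | nil =>
            rw [findStrs_cons_other '\\' [] ofs hc]; exact findStrs_nil _
          | cons d r =>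
            rw [scanStr_bs_cons, Option.map_eq_none_iff] at hs
            rw [findStrs_cons_other '\\' (d :: r) ofs hc]
            simp only [List.length_cons] at hn
            by_cases hd : d = '"'
            · subst hd
              rw [findStrs_cons_quote_none r (ofs + 1) hs]
              exact ih r (ofs + 2) (by omega) hs
            · rw [findStrs_cons_other d r (ofs + 1) hd]
              exact ih r (ofs + 2) (by omega) hs
        · rw [scanStr_other c rest hc hb, Option.map_eq_none_iff] at hs
          rw [findStrs_cons_other c rest ofs hc]
          exact ih rest (ofs + 1) hn hs

-- every span starts at or after the scanning offset
theorem findStrs_ge : ∀ (n : Nat) (l : List Char) (ofs : Nat) (p : Nat × Nat),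
    l.length ≤ n → p ∈ findStrs l ofs → ofs ≤ p.1 := by
  intro n
  induction n with
  | zero =>
    intro l ofs p hn hp
    have h1 : l = [] := List.eq_nil_of_length_eq_zero (Nat.le_zero.mp hn)
    subst h1; rw [findStrs_nil] at hp; cases hp
  | succ n ih =>
    intro l ofs p hn hp
    cases l with
    | nil => rw [findStrs_nil] at hp; cases hp
    | cons c rest =>
      simp only [List.length_cons, Nat.add_le_add_iff_right] at hn
      by_cases hc : c = '"'
      · subst hc
        cases hm : scanStr rest with
        | none =>
          rw [findStrs_cons_quote_none rest ofs hm] at hp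
          exact le_trans (Nat.le_succ ofs) (ih rest (ofs + 1) p hn hp)
        | some m =>
          rw [findStrs_cons_quote_some rest ofs m hm] at hp
          rcases List.mem_cons.mp hp with h | h
          · subst h; exact le_refl _
          · have := ih (rest.drop m) (ofs + m + 1) p (by rw [List.length_drop]; omega) h
            omega
      · rw [findStrs_cons_other c rest ofs hc] at hp
        exact le_trans (Nat.le_succ ofs) (ih rest (ofs + 1) p hn hp)

-- moving the gap pointer one (pre-string) character forward = one stack step
theorem goB_step (spans : List (Nat × Nat)) (chars : List Char) (i : Nat) (stack : List String)
    (h : i < chars.length) (hsp : ∀ p ∈ spans, i + 1 ≤ p.1) :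
    goB spans chars i stack = goB spans chars (i + 1) (stepStack stack chars[i]) := by
  cases spans with
  | nil => rfl
  | cons p rest =>
    obtain ⟨o, c⟩ := p
    have ho : i + 1 ≤ o := hsp (o, c) (List.mem_cons_self)
    have hgap : (chars.drop i).take (o - i) =
        chars[i] :: ((chars.drop (i + 1)).take (o - (i + 1))) := by
      rw [List.drop_eq_getElem_cons h]
      have he : o - i = (o - (i + 1)) + 1 := by omega
      rw [he, List.take_succ_cons]
    simp only [goB, hgap, List.foldl_cons]

-- A's in-string scan that never closes: nothing changes up to the end
theorem inNone : ∀ (n : Nat) (chars : List Char) (j : Nat) (stack : List String) (sp : Option Char),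
    chars.length - j ≤ n → scanStr (chars.drop j) = none →
    loopA chars stack true false sp j = chars := by
  intro n
  induction n with
  | zero =>
    intro chars j stack sp hn _
    exact loopA_end chars stack true false sp j (by omega)
  | succ n ih =>
    intro chars j stack sp hn hs
    by_cases h : j < chars.length
    · have hdrop : chars.drop j = chars[j] :: chars.drop (j + 1) := List.drop_eq_getElem_cons h
      rw [hdrop] at hs
      by_cases hq : chars[j] = '"'
      · rw [hq, scanStr_quote] at hs; cases hs
      · by_cases hb : chars[j] = '\\'
        · rw [loopA_in_bs chars stack sp j h hb]
          by_cases h2 : j + 1 < chars.length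
          · rw [loopA_in_esc chars stack sp (j + 1) h2]
            have hdrop2 : chars.drop (j + 1) = chars[j + 1] :: chars.drop (j + 2) :=
              List.drop_eq_getElem_cons h2
            rw [hdrop2, hb, scanStr_bs_cons, Option.map_eq_none_iff] at hs
            exact ih chars (j + 2) stack sp (by omega) hs
          · exact loopA_end chars stack true true sp (j + 1) h2
        · rw [loopA_in_other chars stack sp j h hb hq]
          rw [scanStr_other chars[j] _ hq hb, Option.map_eq_none_iff] at hs
          exact ih chars (j + 1) stack sp (by omega) hs
    · exact loopA_end chars stack true false sp j h

-- A's in-string scan with a closing quote at j+m-1: it performs exactly the applyFix there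
theorem inSome : ∀ (n : Nat) (chars : List Char) (j : Nat) (stack : List String) (sp : Option Char)
    (m : Nat), chars.length - j ≤ n → scanStr (chars.drop j) = some m →
    loopA chars stack true false sp j =
      loopA (applyFix chars stack sp (j + m - 1)) stack false false sp (j + m) := by
  intro n
  induction n with
  | zero =>
    intro chars j stack sp m hn hs
    rw [List.drop_eq_nil_of_le (by omega), scanStr_nil] at hs; cases hs
  | succ n ih =>
    intro chars j stack sp m hn hs
    by_cases h : j < chars.length
    · have hdrop : chars.drop j = chars[j] :: chars.drop (j + 1) := List.drop_eq_getElem_cons h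
      rw [hdrop] at hs
      by_cases hq : chars[j] = '"'
      · rw [hq, scanStr_quote] at hs
        have hm1 : m = 1 := by injection hs with hh; omega
        subst hm1
        rw [loopA_in_close chars stack sp j h hq]
        have e1 : j + 1 - 1 = j := by omega
        rw [e1]
      · by_cases hb : chars[j] = '\\'
        · rw [loopA_in_bs chars stack sp j h hb]
          by_cases h2 : j + 1 < chars.length
          · have hdrop2 : chars.drop (j + 1) = chars[j + 1] :: chars.drop (j + 2) :=
              List.drop_eq_getElem_cons h2
            rw [hdrop2, hb, scanStr_bs_cons, Option.map_eq_some_iff] at hs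
            obtain ⟨m', hm', hmm⟩ := hs
            subst hmm
            rw [loopA_in_esc chars stack sp (j + 1) h2]
            have e1 : j + (m' + 2) - 1 = j + 2 + m' - 1 := by omega
            have e2 : j + (m' + 2) = j + 2 + m' := by omega
            rw [e1, e2]
            exact ih chars (j + 2) stack sp m' (by omega) hm'
          · rw [List.drop_eq_nil_of_le (by omega), hb, scanStr_bs_nil] at hs; cases hs
        · rw [scanStr_other chars[j] _ hq hb, Option.map_eq_some_iff] at hs
          obtain ⟨m', hm', hmm⟩ := hs
          subst hmm
          rw [loopA_in_other chars stack sp j h hb hq]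
          have e1 : j + (m' + 1) - 1 = j + 1 + m' - 1 := by omega
          have e2 : j + (m' + 1) = j + 1 + m' := by omega
          rw [e1, e2]
          exact ih chars (j + 1) stack sp m' (by omega) hm'
    · rw [List.drop_eq_nil_of_le (by omega), scanStr_nil] at hs; cases hs

-- the main correspondence: A's loop from any out-of-string position = B's fold over the spans
theorem main_aux : ∀ (n : Nat) (chars : List Char) (i : Nat) (stack : List String) (sp : Option Char),
    chars.length - i ≤ n →
    loopA chars stack false false sp i = goB (findStrs (chars.drop i) i) chars i stack := by
  intro n
  induction n with
  | zero =>
    intro chars i stack sp hn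
    rw [loopA_end chars stack false false sp i (by omega),
        List.drop_eq_nil_of_le (by omega), findStrs_nil]
    rfl
  | succ n ih =>
    intro chars i stack sp hn
    by_cases h : i < chars.length
    · have hdrop : chars.drop i = chars[i] :: chars.drop (i + 1) := List.drop_eq_getElem_cons h
      by_cases hq : chars[i] = '"'
      · rw [loopA_open chars stack false sp i h hq]
        cases hm : scanStr (chars.drop (i + 1)) with
        | none =>
          rw [inNone (chars.length) chars (i + 1) stack (prevNonWs chars i) (by omega) hm]
          rw [hdrop, hq, findStrs_cons_quote_none _ _ hm,
              fail_prop (chars.length) _ _ (by simp) hm]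
          rfl
        | some m =>
          have hm1 : 1 ≤ m := scanStr_pos _ _ hm
          rw [inSome (chars.length) chars (i + 1) stack (prevNonWs chars i) m (by omega) hm]
          have he1 : i + 1 + m - 1 = i + m := by omega
          have he2 : i + 1 + m = i + m + 1 := by omega
          rw [he1, he2]
          rw [ih (applyFix chars stack (prevNonWs chars i) (i + m)) (i + m + 1) stack
            (prevNonWs chars i) (by rw [applyFix_length]; omega)]
          rw [applyFix_findStrs]
          rw [hdrop, hq, findStrs_cons_quote_some _ _ _ hm]
          have hdd : (chars.drop (i + 1)).drop m = chars.drop (i + m + 1) := by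
            rw [List.drop_drop, Nat.add_right_comm]
          rw [hdd]
          simp only [goB, Nat.sub_self, List.take_zero, List.foldl_nil]
      · rw [loopA_out_step chars stack false sp i h hq]
        rw [ih chars (i + 1) (stepStack stack chars[i]) sp (by omega)]
        rw [hdrop, findStrs_cons_other _ _ _ hq]
        exact (goB_step _ chars i stack h
          (fun p hp => findStrs_ge (chars.drop (i + 1)).length _ _ p (le_refl _) hp)).symm
    · rw [loopA_end chars stack false false sp i h,
        List.drop_eq_nil_of_le (by omega), findStrs_nil]
      rfl

theorem main_lemma : ∀ (chars : List Char) (i : Nat) (stack : List String) (sp : Option Char),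
    loopA chars stack false false sp i = goB (findStrs (chars.drop i) i) chars i stack :=
  fun chars i stack sp => main_aux (chars.length) chars i stack sp (Nat.sub_le _ _)

-- ===== VERDICT (by name: the statement is the Claim_ definition above) =====
theorem coerce_missing_colons_py_spec : Claim_equal_coerce_missing_colons_py := by
  intro fragment _
  unfold Spec_coerce_missing_colons_py coerce_missing_colons_py coerce_missing_colons_py_alt
  rw [main_lemma fragment.toList 0 [] none]
  rfl
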